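-- pv_equiv track=rewrite | github.com/Xilinx/mlir-air | python/spensor/spensor/passes/tile_parallel.py | tile_parallel_op
-- ===== SOURCE A (Python) =====
-- def tile_parallel_op(
--     upper_bounds: tuple[int, ...], memory_shape: tuple[int, ...]
-- ) -> tuple[tuple[tuple[int, ...], tuple[int, ...]], ...]:
--     bounds_queue = list(upper_bounds)
--     shape_queue = list(memory_shape)
--     tile_all_bounds: list[tuple[tuple[int, ...], tuple[int, ...]]] = []
--     while len(bounds_queue) > 0:
--         bound = bounds_queue.pop(0)
--         if len(shape_queue) == 0:
--             tile_all_bounds.append(((), (bound,)))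
--         else:
--             extra_tile_current_bound = ()
--             if shape_queue[0] >= bound:
--                 shape_queue.pop(0)
--                 tile_current_bound = [bound]
--             else:
--                 tile_current_bound: list[int] = []
--                 while len(shape_queue) > 0:
--                     shape = shape_queue.pop(0)
--                     for try_shape in range(shape, 0, -1):
--                         if bound % try_shape == 0:
--                             tile_current_bound.append(try_shape)
--                             bound //= try_shape
--                             break
--                     # One dimension for each dimension
--                     break
--                     # Multi dimension for one dimension
--                     if bound == 1:
--                         break
--                 if bound != 1:
--                     extra_tile_current_bound = (bound,)
--             tile_all_bounds.append(
--                 (tuple(tile_current_bound), extra_tile_current_bound)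
--             )
--     return tuple(tile_all_bounds)
-- ===== SOURCE B (Python) =====
-- def tile_parallel_op(upper_bounds, memory_shape):
--     out = [_tile_one(bound, shape) for bound, shape in zip(upper_bounds, memory_shape)]
--     out.extend(((), (bound,)) for bound in upper_bounds[len(memory_shape):])
--     return tuple(out)
--
--
-- def _tile_one(bound, shape):
--     if shape >= bound:
--         return ((bound,), ())
--     if shape <= 0:
--         return ((), (bound,) if bound != 1 else ())
--     best = _largest_divisor_le(bound, shape)
--     rest = bound // best
--     return ((best,), (rest,) if rest != 1 else ())
--
--
-- def _largest_divisor_le(bound, shape):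
--     # largest divisor of bound that is <= shape (1 <= shape < bound here)
--     best = 1
--     d = 1
--     while d * d <= bound:
--         if bound % d == 0:
--             q = bound // d
--             if d <= shape and d > best:
--                 best = d
--             if q <= shape and q > best:
--                 best = q
--         d += 1
--     return best
-- ===== Notes on version B (the rewrite author's own statement) =====
-- stated objective: faster
-- what changed: Replaced A's queue mutation and linear downward scan from shape (O(shape) trial divisions per bound) by a zip over the two lists and a sqrt-bounded divisor enumeration that picks the largest divisor of bound that is <= shape.
import Mathlib
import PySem

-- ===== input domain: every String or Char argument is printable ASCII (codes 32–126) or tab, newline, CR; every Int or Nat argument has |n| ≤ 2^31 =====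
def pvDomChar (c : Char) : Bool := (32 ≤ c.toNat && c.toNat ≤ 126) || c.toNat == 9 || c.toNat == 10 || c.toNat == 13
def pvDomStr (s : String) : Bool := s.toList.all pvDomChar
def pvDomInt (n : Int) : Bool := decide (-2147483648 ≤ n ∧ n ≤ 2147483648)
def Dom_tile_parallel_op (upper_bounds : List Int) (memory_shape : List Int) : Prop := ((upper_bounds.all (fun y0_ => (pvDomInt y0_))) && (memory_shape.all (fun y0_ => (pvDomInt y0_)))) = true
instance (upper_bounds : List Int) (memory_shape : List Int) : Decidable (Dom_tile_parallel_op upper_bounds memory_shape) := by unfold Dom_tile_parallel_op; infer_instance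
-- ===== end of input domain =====

-- B replaces A's queue mutation and linear downward divisor scan by a zip and a sqrt-bounded
-- divisor enumeration (largest divisor of bound that is ≤ shape); objective: faster.

-- ===== PORT A =====
-- inner 'for try_shape in range(shape, 0, -1)' with break: first t in the countdown dividing bound
def tpoFindTry (bound : Int) : List Int → List Int × Int
  | [] => ([], bound)
  | t :: rest =>
    if PySem.Int.mod bound t = 0 then ([t], PySem.Int.floordiv bound t)
    else tpoFindTry bound rest

-- outer 'while len(bounds_queue) > 0' loop; one shape is popped per bound when available
def tpoLoop : List Int → List Int → List (List Int × List Int)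
  | [], _ => []
  | bound :: bq, sq =>
    match sq with
    | [] => ([], [bound]) :: tpoLoop bq []
    | shape :: sq' =>
      if shape ≥ bound then
        ([bound], []) :: tpoLoop bq sq'
      else
        let r := tpoFindTry bound (PySem.List.pyRange shape 0 (-1))
        (r.1, if r.2 ≠ 1 then [r.2] else []) :: tpoLoop bq sq'

def tile_parallel_op (upper_bounds : List Int) (memory_shape : List Int) : List (List Int × List Int) :=
  tpoLoop upper_bounds memory_shape

-- ===== PORT B =====
-- _largest_divisor_le's while loop: d runs while d*d <= bound, tracking the best divisor ≤ shape
def altBestLoop (bound shape : Int) (d best : Int) : Int :=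
  if d * d ≤ bound then
    let best' :=
      if PySem.Int.mod bound d = 0 then
        let q := PySem.Int.floordiv bound d
        let b1 := if d ≤ shape ∧ best < d then d else best
        if q ≤ shape ∧ b1 < q then q else b1
      else best
    altBestLoop bound shape (d + 1) best'
  else best
termination_by (bound + 1 - d).toNat
decreasing_by
  have hd : d ≤ d * d := by nlinarith
  omega

-- _tile_one
def altTileOne (bound shape : Int) : List Int × List Int :=
  if shape ≥ bound then ([bound], [])
  else if shape ≤ 0 then ([], if bound ≠ 1 then [bound] else [])
  else
    let best := altBestLoop bound shape 1 1
    let rest := PySem.Int.floordiv bound best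
    ([best], if rest ≠ 1 then [rest] else [])

def tile_parallel_op_alt (upper_bounds : List Int) (memory_shape : List Int) : List (List Int × List Int) :=
  ((upper_bounds.zip memory_shape).map (fun p => altTileOne p.1 p.2))
    ++ (upper_bounds.drop memory_shape.length).map (fun b => ([], [b]))

-- ===== PRECONDITION & SPEC =====
def Spec_tile_parallel_op (upper_bounds : List Int) (memory_shape : List Int) (out : List (List Int × List Int)) : Prop := out = tile_parallel_op_alt upper_bounds memory_shape
instance (upper_bounds : List Int) (memory_shape : List Int) (out : List (List Int × List Int)) : Decidable (Spec_tile_parallel_op upper_bounds memory_shape out) := by unfold Spec_tile_parallel_op; infer_instance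

-- ===== CLAIM (what is proved, stated in full; the proofs are below) =====
def Claim_equal_tile_parallel_op : Prop := ∀ (upper_bounds : List Int) (memory_shape : List Int), Dom_tile_parallel_op upper_bounds memory_shape → Spec_tile_parallel_op upper_bounds memory_shape (tile_parallel_op upper_bounds memory_shape)

-- ===== LEMMAS AND PROOFS =====

-- t is the largest divisor of bound among the integers ≤ shape (and ≥ 1)
def MaxDivLe (bound shape t : Int) : Prop :=
  1 ≤ t ∧ t ≤ shape ∧ t ∣ bound ∧ ∀ u, t < u → u ≤ shape → ¬ u ∣ bound

-- postcondition of B's divisor loop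
def BestPost (bound shape r : Int) : Prop :=
  1 ≤ r ∧ r ≤ shape ∧ r ∣ bound ∧ ∀ u, 1 ≤ u → u ≤ shape → u ∣ bound → u ≤ r

lemma maxDivLe_unique {bound shape t₁ t₂ : Int}
    (h₁ : MaxDivLe bound shape t₁) (h₂ : MaxDivLe bound shape t₂) : t₁ = t₂ := by
  obtain ⟨_, hs₁, hd₁, hm₁⟩ := h₁
  obtain ⟨_, hs₂, hd₂, hm₂⟩ := h₂
  by_contra hne
  rcases lt_trichotomy t₁ t₂ with h | h | h
  · exact hm₁ t₂ h hs₂ hd₂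
  · exact hne h
  · exact hm₂ t₁ h hs₁ hd₁

lemma bestPost_maxDivLe {bound shape r : Int} (h : BestPost bound shape r) :
    MaxDivLe bound shape r := by
  obtain ⟨h1, h2, h3, h4⟩ := h
  refine ⟨h1, h2, h3, ?_⟩
  intro u hu hus hdvd
  have := h4 u (by omega) hus hdvd
  omega

lemma floordiv_mul_cancel (u k : Int) (hu : 0 < u) :
    PySem.Int.floordiv (u * k) u = k := by
  rw [PySem.Int.floordiv_eq_iff_of_pos hu]
  constructor <;> nlinarith

-- once the loop has passed d with d*d > bound, every divisor pair of bound has been seen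
lemma exit_cover (bound u d c : Int) (hu : 1 ≤ u) (hd : 1 ≤ d)
    (hdd : ¬ d * d ≤ bound) (hc : bound = u * c) :
    u < d ∨ PySem.Int.floordiv bound u < d := by
  by_cases hud : u < d
  · exact Or.inl hud
  · right
    have hfdu : PySem.Int.floordiv bound u = c := by
      rw [hc]; exact floordiv_mul_cancel u c (by omega)
    rw [hfdu]
    by_contra hcd
    push Not at hcd
    have : d * d ≤ u * c := mul_le_mul (by omega) (by omega) (by omega) (by omega)
    omega

lemma tpoFindTry_spec (bound : Int) :
    ∀ (n : Nat) (shape : Int), shape.toNat ≤ n → 1 ≤ shape →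
    ∃ t, MaxDivLe bound shape t ∧
      tpoFindTry bound (PySem.List.pyRange shape 0 (-1)) = ([t], PySem.Int.floordiv bound t) := by
  intro n
  induction n with
  | zero => intro shape h h1; omega
  | succ n ih =>
    intro shape h h1
    rw [PySem.List.pyRange_neg_one_cons (by omega : (0:Int) < shape)]
    by_cases hm : PySem.Int.mod bound shape = 0
    · refine ⟨shape, ⟨h1, le_refl _, (PySem.Int.mod_eq_zero_iff_dvd bound shape).mp hm, ?_⟩, ?_⟩
      · intro u hu hus; omega
      · simp [tpoFindTry, hm]
    · have h2 : 2 ≤ shape := by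
        by_contra hc
        have : shape = 1 := by omega
        subst this
        exact hm ((PySem.Int.mod_eq_zero_iff_dvd bound 1).mpr (one_dvd bound))
      obtain ⟨t, ⟨ht1, ht2, ht3, ht4⟩, heq⟩ := ih (shape - 1) (by omega) (by omega)
      refine ⟨t, ⟨ht1, by omega, ht3, ?_⟩, ?_⟩
      · intro u hu hus hdvd
        by_cases hlt : u ≤ shape - 1
        · exact ht4 u hu hlt hdvd
        · have : u = shape := by omega
          subst this
          exact hm ((PySem.Int.mod_eq_zero_iff_dvd bound u).mpr hdvd)
      · simp [tpoFindTry, hm, heq]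

lemma altBestLoop_post (bound shape : Int) (hb : 2 ≤ bound) :
    ∀ (n : Nat) (d best : Int), (bound + 1 - d).toNat ≤ n → 1 ≤ d →
      1 ≤ best → best ≤ shape → best ∣ bound →
      (∀ u, 1 ≤ u → u ≤ shape → u ∣ bound →
        (u < d ∨ PySem.Int.floordiv bound u < d) → u ≤ best) →
      BestPost bound shape (altBestLoop bound shape d best) := by
  intro n
  induction n with
  | zero =>
    intro d best hn hd hb1 hbs hbd hinv
    have hdb : bound < d := by omega
    have hdd : ¬ d * d ≤ bound := by nlinarith
    rw [altBestLoop]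
    simp only [if_neg hdd]
    refine ⟨hb1, hbs, hbd, ?_⟩
    intro u h1 h2 h3
    obtain ⟨c, hc⟩ := h3
    exact hinv u h1 h2 ⟨c, hc⟩ (exit_cover bound u d c h1 hd hdd hc)
  | succ n ih =>
    intro d best hn hd hb1 hbs hbd hinv
    rw [altBestLoop]
    by_cases hdd : d * d ≤ bound
    · have hdbound : d ≤ bound := by nlinarith
      simp only [if_pos hdd]
      by_cases hm : PySem.Int.mod bound d = 0
      · simp only [if_pos hm]
        have hdvd : d ∣ bound := (PySem.Int.mod_eq_zero_iff_dvd bound d).mp hm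
        obtain ⟨k, hk⟩ := hdvd
        have hq : PySem.Int.floordiv bound d = k := by
          rw [hk]; exact floordiv_mul_cancel d k (by omega)
        have hkdvd : k ∣ bound := ⟨d, by rw [hk]; ring⟩
        rw [hq]
        -- name the updated best
        set b1 := if d ≤ shape ∧ best < d then d else best with hb1def
        set b2 := if k ≤ shape ∧ b1 < k then k else b1 with hb2def
        have hmono1 : best ≤ b1 := by rw [hb1def]; split_ifs <;> omega
        have hmono2 : b1 ≤ b2 := by rw [hb2def]; split_ifs <;> omega
        have hb2s : b2 ≤ shape := by
          rw [hb2def, hb1def]; split_ifs <;> omega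
        have hb2d : b2 ∣ bound := by
          rw [hb2def]
          split_ifs with h
          · exact hkdvd
          · rw [hb1def]; split_ifs with h'
            · exact ⟨k, hk⟩
            · exact hbd
        apply ih (d + 1) b2 (by omega) (by omega) (by omega) hb2s hb2d
        intro u h1 h2 h3 hcov
        by_cases hold : u < d ∨ PySem.Int.floordiv bound u < d
        · have := hinv u h1 h2 h3 hold
          omega
        · push Not at hold
          obtain ⟨c, hc⟩ := h3
          have hfdu : PySem.Int.floordiv bound u = c := by
            rw [hc]; exact floordiv_mul_cancel u c (by omega)
          rcases hcov with hcov | hcov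
          · -- u = d
            have hud : u = d := by omega
            subst hud
            have : u ≤ b1 := by rw [hb1def]; split_ifs with h' <;> omega
            omega
          · -- floordiv bound u = d, i.e. c = d, so k = u
            have hcd : c = d := by omega
            have hku : k = u := by
              have : u * c = d * k := by rw [← hc, hk]
              rw [hcd] at this
              have hd0 : (d : Int) ≠ 0 := by omega
              exact (mul_left_cancel₀ hd0 (by linarith [this] : d * u = d * k)).symm
            subst hku
            rw [hb2def]; split_ifs with h' <;> omega
      · simp only [if_neg hm]
        apply ih (d + 1) best (by omega) (by omega) hb1 hbs hbd
        intro u h1 h2 h3 hcov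
        by_cases hold : u < d ∨ PySem.Int.floordiv bound u < d
        · exact hinv u h1 h2 h3 hold
        · push Not at hold
          exfalso
          obtain ⟨c, hc⟩ := h3
          have hfdu : PySem.Int.floordiv bound u = c := by
            rw [hc]; exact floordiv_mul_cancel u c (by omega)
          rcases hcov with hcov | hcov
          · have : u = d := by omega
            subst this
            exact hm ((PySem.Int.mod_eq_zero_iff_dvd bound u).mpr ⟨c, hc⟩)
          · have hcd : c = d := by omega
            exact hm ((PySem.Int.mod_eq_zero_iff_dvd bound d).mpr ⟨u, by rw [hc, hcd]; ring⟩)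
    · simp only [if_neg hdd]
      refine ⟨hb1, hbs, hbd, ?_⟩
      intro u h1 h2 h3
      obtain ⟨c, hc⟩ := h3
      exact hinv u h1 h2 ⟨c, hc⟩ (exit_cover bound u d c h1 hd hdd hc)

lemma tile_head_eq (bound shape : Int) :
    (if shape ≥ bound then (([bound], []) : List Int × List Int)
     else
       let r := tpoFindTry bound (PySem.List.pyRange shape 0 (-1))
       (r.1, if r.2 ≠ 1 then [r.2] else [])) = altTileOne bound shape := by
  by_cases hge : shape ≥ bound
  · simp [altTileOne, hge]
  · by_cases hs0 : shape ≤ 0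
    · rw [PySem.List.pyRange_neg_one_eq_nil (by omega : shape ≤ 0)]
      simp [altTileOne, hge, hs0, tpoFindTry]
    · have hs1 : 1 ≤ shape := by omega
      have hb2 : 2 ≤ bound := by omega
      obtain ⟨t, hmax, heq⟩ := tpoFindTry_spec bound shape.toNat shape (le_refl _) hs1
      have hpost : BestPost bound shape (altBestLoop bound shape 1 1) := by
        apply altBestLoop_post bound shape hb2 (bound + 1 - 1).toNat 1 1 (le_refl _)
          (by omega) (by omega) hs1 (one_dvd bound)
        intro u h1 h2 h3 hcov
        rcases hcov with hcov | hcov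
        · omega
        · exfalso
          obtain ⟨c, hc⟩ := h3
          have hfdu : PySem.Int.floordiv bound u = c := by
            rw [hc]; exact floordiv_mul_cancel u c (by omega)
          nlinarith [hfdu ▸ hcov]
      have ht : t = altBestLoop bound shape 1 1 :=
        maxDivLe_unique hmax (bestPost_maxDivLe hpost)
      simp only [if_neg hge, heq, altTileOne, hs0]
      rw [ht]
      simp

lemma tile_parallel_op_loop_eq : ∀ (bq sq : List Int),
    tpoLoop bq sq = tile_parallel_op_alt bq sq := by
  intro bq
  induction bq with
  | nil => intro sq; cases sq <;> simp [tpoLoop, tile_parallel_op_alt]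
  | cons b bq ih =>
    intro sq
    cases sq with
    | nil =>
      simp only [tpoLoop, tile_parallel_op_alt] at *
      simp [ih []]
    | cons s sq' =>
      have hhead := tile_head_eq b s
      simp only [tpoLoop, tile_parallel_op_alt, List.zip_cons_cons, List.map_cons,
        List.length_cons, List.drop_succ_cons, List.cons_append]
      rw [ih sq']
      simp only [tile_parallel_op_alt]
      by_cases hge : s ≥ b
      · simp only [if_pos hge] at hhead ⊢
        rw [hhead]
      · simp only [if_neg hge] at hhead ⊢
        rw [hhead]

-- ===== VERDICT (by name: the statement is the Claim_ definition above) =====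
theorem tile_parallel_op_spec : Claim_equal_tile_parallel_op := by
  intro ub ms _
  unfold Spec_tile_parallel_op tile_parallel_op
  exact tile_parallel_op_loop_eq ub ms
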